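-- pv_equiv track=rewrite | github.com/belisky/AlgoMornings | DynamicProgramming-Hard/maximize-expression/maximize-expression.py | maximizeExpression
-- ===== SOURCE A (Python) =====
-- def maximizeExpression(array):
--     if len(array) < 4:
--         return 0
--     maxA = [array[0]]
--     maxAMinusB = [float('-inf')]
--     maxAMinusBPlusC = [float('-inf')]*2
--     maxAMinusBPlusCMinusD = [float('-inf')]*3
--
--     for idx in range(1, len(array)):
--         curMax = max(maxA[idx-1], array[idx])
--         maxA.append(curMax)
--     for idx in range(1, len(array)):
--         curMax = max(maxAMinusB[idx-1], maxA[idx-1]-array[idx])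
--         maxAMinusB.append(curMax)
--     for idx in range(2, len(array)):
--         curMax = max(maxAMinusBPlusC[idx-1], maxAMinusB[idx-1]+array[idx])
--         maxAMinusBPlusC.append(curMax)
--     for idx in range(3, len(array)):
--         curMax = max(maxAMinusBPlusCMinusD[idx-1],
--                      maxAMinusBPlusC[idx-1]-array[idx])
--         maxAMinusBPlusCMinusD.append(curMax)
--     # Write your code here.
--     return maxAMinusBPlusCMinusD[len(maxAMinusBPlusCMinusD)-1]
-- ===== SOURCE B (Python) =====
-- def maximizeExpression(array):
--     if len(array) < 4:
--         return 0
--     bestA = array[0]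
--     bestAB = float('-inf')
--     bestABC = float('-inf')
--     bestABCD = float('-inf')
--     for v in array[1:]:
--         bestABCD = max(bestABCD, bestABC - v)
--         bestABC = max(bestABC, bestAB + v)
--         bestAB = max(bestAB, bestA - v)
--         bestA = max(bestA, v)
--     return bestABCD
-- ===== Notes on version B (the rewrite author's own statement) =====
-- stated objective: simpler
-- what changed: Replaces A's four separate list-building DP passes (with cross-list indexing) by a single pass over the array maintaining four scalar running maxima updated in reverse dependency order, using O(1) extra space.
import Mathlib
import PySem

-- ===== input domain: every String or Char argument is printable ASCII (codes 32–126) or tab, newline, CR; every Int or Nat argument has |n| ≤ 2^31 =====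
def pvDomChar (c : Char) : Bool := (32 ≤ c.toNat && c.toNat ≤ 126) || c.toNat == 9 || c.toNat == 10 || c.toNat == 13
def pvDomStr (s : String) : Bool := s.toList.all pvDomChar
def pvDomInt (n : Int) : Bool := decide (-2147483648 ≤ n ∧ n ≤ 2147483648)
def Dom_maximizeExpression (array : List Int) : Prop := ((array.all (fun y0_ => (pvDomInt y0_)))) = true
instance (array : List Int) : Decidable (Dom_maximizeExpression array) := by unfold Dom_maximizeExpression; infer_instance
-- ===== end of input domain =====

-- B replaces A's four list-building passes by a single pass keeping four scalar running maxima (simpler, O(1) extra space).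


-- ===== PORT A =====
-- Python's float('-inf') is represented as `none : Option Int` (it only ever appears as a
-- bottom element of max and as an absorbing summand; the returned value is always an Int).
def optMax : Option Int → Option Int → Option Int
  | none, p => p
  | some a, none => some a
  | some a, some b => some (max a b)

-- the four loops of A, one def each; list indices `idx`/`idx-1` are always in range in the
-- Python (loop bounds guarantee it), so `getD` with a junk default is exact here.
def stepA1 (arr : List Int) (L : List Int) (idx : Nat) : List Int :=
  L ++ [max (L.getD (idx - 1) 0) (arr.getD idx 0)]
def loopA1 (arr : List Int) : List Int :=
  (List.range' 1 (arr.length - 1)).foldl (stepA1 arr) [arr.getD 0 0]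
def stepA2 (arr mA : List Int) (L : List (Option Int)) (idx : Nat) : List (Option Int) :=
  L ++ [optMax (L.getD (idx - 1) none) (some (mA.getD (idx - 1) 0 - arr.getD idx 0))]
def loopA2 (arr : List Int) : List (Option Int) :=
  (List.range' 1 (arr.length - 1)).foldl (stepA2 arr (loopA1 arr)) [none]
def stepA3 (arr : List Int) (mAB : List (Option Int)) (L : List (Option Int)) (idx : Nat) : List (Option Int) :=
  L ++ [optMax (L.getD (idx - 1) none) ((mAB.getD (idx - 1) none).map (· + arr.getD idx 0))]
def loopA3 (arr : List Int) : List (Option Int) :=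
  (List.range' 2 (arr.length - 2)).foldl (stepA3 arr (loopA2 arr)) [none, none]
def stepA4 (arr : List Int) (mABC : List (Option Int)) (L : List (Option Int)) (idx : Nat) : List (Option Int) :=
  L ++ [optMax (L.getD (idx - 1) none) ((mABC.getD (idx - 1) none).map (· - arr.getD idx 0))]
def loopA4 (arr : List Int) : List (Option Int) :=
  (List.range' 3 (arr.length - 3)).foldl (stepA4 arr (loopA3 arr)) [none, none, none]

def maximizeExpression (array : List Int) : Int :=
  if array.length < 4 then 0
  else
    let d := loopA4 array
    -- final value is always an Int (len ≥ 4), so `.getD 0` never fires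
    (d.getD (d.length - 1) none).getD 0

-- ===== PORT B =====
def stepB (s : Int × Option Int × Option Int × Option Int) (v : Int) :
    Int × Option Int × Option Int × Option Int :=
  let (a, b, c, d) := s
  (max a v, optMax b (some (a - v)), optMax c (b.map (· + v)), optMax d (c.map (· - v)))

def maximizeExpression_alt (array : List Int) : Int :=
  if array.length < 4 then 0
  else
    -- array[0] and array[1:]; indices in range since len ≥ 4
    let s := (array.drop 1).foldl stepB (array.getD 0 0, none, none, none)
    (s.2.2.2).getD 0

-- ===== PRECONDITION & SPEC =====
def Spec_maximizeExpression (array : List Int) (out : Int) : Prop := out = maximizeExpression_alt array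
instance (array : List Int) (out : Int) : Decidable (Spec_maximizeExpression array out) := by unfold Spec_maximizeExpression; infer_instance

-- ===== CLAIM (what is proved, stated in full; the proofs are below) =====
def Claim_equal_maximizeExpression : Prop := ∀ (array : List Int), Dom_maximizeExpression array → Spec_maximizeExpression array (maximizeExpression array)

-- ===== LEMMAS AND PROOFS =====

-- the four DP sequences (index i = position in the array)
def aS (arr : List Int) : Nat → Int
  | 0 => arr.getD 0 0
  | k + 1 => max (aS arr k) (arr.getD (k + 1) 0)
def bS (arr : List Int) : Nat → Option Int
  | 0 => none
  | k + 1 => optMax (bS arr k) (some (aS arr k - arr.getD (k + 1) 0))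
def cS (arr : List Int) : Nat → Option Int
  | 0 => none
  | k + 1 => optMax (cS arr k) ((bS arr k).map (· + arr.getD (k + 1) 0))
def dS (arr : List Int) : Nat → Option Int
  | 0 => none
  | k + 1 => optMax (dS arr k) ((cS arr k).map (· - arr.getD (k + 1) 0))

lemma getD_map_range {α : Type} (f : Nat → α) {m i : Nat} (d : α) (h : i < m) :
    ((List.range m).map f).getD i d = f i := by
  simp [List.getD, List.getElem?_map, List.getElem?_range h]

lemma loopA1_aux (arr : List Int) :
    ∀ k, (List.range' 1 k).foldl (stepA1 arr) [arr.getD 0 0] = (List.range (k + 1)).map (aS arr) := by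
  intro k
  induction k with
  | zero => simp [aS]
  | succ k ih =>
    rw [List.range'_1_concat, List.foldl_append, ih]
    simp only [List.foldl_cons, List.foldl_nil, stepA1]
    rw [getD_map_range _ _ (by omega : 1 + k - 1 < k + 1)]
    conv_rhs => rw [List.range_succ, List.map_append]
    have h2 : 1 + k = k + 1 := by omega
    simp [h2, aS]

lemma loopA2_aux (arr : List Int) :
    ∀ k, k ≤ arr.length - 1 →
      (List.range' 1 k).foldl (stepA2 arr (loopA1 arr)) [none] = (List.range (k + 1)).map (bS arr) := by
  intro k
  induction k with
  | zero => intro _; simp [bS]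
  | succ k ih =>
    intro hk
    rw [List.range'_1_concat, List.foldl_append, ih (by omega)]
    simp only [List.foldl_cons, List.foldl_nil, stepA2]
    rw [getD_map_range _ _ (by omega : 1 + k - 1 < k + 1)]
    rw [loopA1, loopA1_aux, getD_map_range _ _ (by omega : 1 + k - 1 < arr.length - 1 + 1)]
    conv_rhs => rw [List.range_succ, List.map_append]
    have h2 : 1 + k = k + 1 := by omega
    simp [h2, bS]

lemma loopA3_aux (arr : List Int) :
    ∀ k, k ≤ arr.length - 2 →
      (List.range' 2 k).foldl (stepA3 arr (loopA2 arr)) [none, none] = (List.range (k + 2)).map (cS arr) := by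
  intro k
  induction k with
  | zero => intro _; simp [cS, bS, optMax, List.range_succ]
  | succ k ih =>
    intro hk
    rw [List.range'_1_concat, List.foldl_append, ih (by omega)]
    simp only [List.foldl_cons, List.foldl_nil, stepA3]
    rw [getD_map_range _ _ (by omega : 2 + k - 1 < k + 2)]
    rw [loopA2, loopA2_aux arr (arr.length - 1) (le_refl _),
        getD_map_range _ _ (by omega : 2 + k - 1 < arr.length - 1 + 1)]
    conv_rhs => rw [show k + 1 + 2 = (k + 2) + 1 from rfl, List.range_succ, List.map_append]
    have h2 : 2 + k = k + 2 := by omega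
    simp [h2, cS]

lemma loopA4_aux (arr : List Int) :
    ∀ k, k ≤ arr.length - 3 →
      (List.range' 3 k).foldl (stepA4 arr (loopA3 arr)) [none, none, none] = (List.range (k + 3)).map (dS arr) := by
  intro k
  induction k with
  | zero => intro _; simp [dS, cS, bS, optMax, List.range_succ]
  | succ k ih =>
    intro hk
    rw [List.range'_1_concat, List.foldl_append, ih (by omega)]
    simp only [List.foldl_cons, List.foldl_nil, stepA4]
    rw [getD_map_range _ _ (by omega : 3 + k - 1 < k + 3)]
    rw [loopA3, loopA3_aux arr (arr.length - 2) (le_refl _),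
        getD_map_range _ _ (by omega : 3 + k - 1 < arr.length - 2 + 2)]
    conv_rhs => rw [show k + 1 + 3 = (k + 3) + 1 from rfl, List.range_succ, List.map_append]
    have h2 : 3 + k = k + 3 := by omega
    simp [h2, dS]

-- B's single pass computes the same four sequences
lemma foldB_take (x : Int) (xs : List Int) :
    ∀ k, k ≤ xs.length →
      (xs.take k).foldl stepB (x, none, none, none) =
        (aS (x :: xs) k, bS (x :: xs) k, cS (x :: xs) k, dS (x :: xs) k) := by
  intro k
  induction k with
  | zero => intro _; simp [aS, bS, cS, dS]
  | succ k ih =>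
    intro hk
    have hlt : k < xs.length := by omega
    rw [List.take_add_one, List.getElem?_eq_getElem hlt]
    simp only [Option.toList_some, List.foldl_append, ih (by omega), List.foldl_cons, List.foldl_nil]
    have hx : xs[k] = (x :: xs).getD (k + 1) 0 := by
      simp [List.getD, List.getElem?_eq_getElem hlt]
    simp [stepB, aS, bS, cS, dS, hx]

theorem pv_main : ∀ (array : List Int), maximizeExpression array = maximizeExpression_alt array := by
  intro array
  unfold maximizeExpression maximizeExpression_alt
  by_cases h : array.length < 4
  · simp [h]
  · simp only [h, if_false]
    match array, h with
    | x :: xs, h =>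
      have hB := foldB_take x xs xs.length (le_refl _)
      rw [List.take_length] at hB
      simp only [List.drop_one, List.tail_cons, List.getD_cons_zero, hB]
      have hA := loopA4_aux (x :: xs) ((x :: xs).length - 3) (le_refl _)
      rw [loopA4, hA]
      have h3 : (x :: xs).length - 3 + 3 = xs.length + 1 := by simp at h ⊢; omega
      rw [h3]
      simp only [List.length_map, List.length_range]
      rw [getD_map_range _ _ (by omega : xs.length + 1 - 1 < xs.length + 1)]
      simp

-- ===== VERDICT (by name: the statement is the Claim_ definition above) =====
theorem maximizeExpression_spec : Claim_equal_maximizeExpression := by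
  intro array _
  unfold Spec_maximizeExpression
  exact pv_main array
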